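-- pv_equiv track=rewrite | github.com/danielphillippe27-netizen/flyrpro | s3_to_supabase_loader.py | pick_latest_per_source
-- ===== SOURCE A (Python) =====
-- from typing import Dict, List, Tuple
--
-- def pick_latest_per_source(files: List[Dict]) -> List[Dict]:
--     """Keep only the latest dated key per source_id."""
--     latest: Dict[str, Dict] = {}
--     for f in files:
--         key = f.get("key", "")
--         source_id = f.get("source_id", "")
--         parts = key.split("/")
--         # Expected .../<source_id>/<yyyymmdd>/<filename>
--         date_folder = parts[-2] if len(parts) >= 2 else ""
--         prev = latest.get(source_id)
--         if prev is None or date_folder > prev.get("_date_folder", ""):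
--             item = dict(f)
--             item["_date_folder"] = date_folder
--             latest[source_id] = item
--
--     result = []
--     for item in latest.values():
--         item.pop("_date_folder", None)
--         result.append(item)
--     result.sort(key=lambda x: x.get("source_id", ""))
--     return result
-- ===== SOURCE B (Python) =====
-- def pick_latest_per_source(files):
--     """Keep only the latest dated key per source_id.
--
--     Group-then-reduce: one pass groups the files by source_id, then each
--     group is reduced with max (first maximal date wins), and the winners
--     are returned sorted by source_id.
--     """
--     def date_folder(f):
--         parts = f.get("key", "").split("/")
--         return parts[-2] if len(parts) >= 2 else ""
--
--     groups = {}
--     for f in files: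
--         groups.setdefault(f.get("source_id", ""), []).append(f)
--
--     winners = [max(group, key=date_folder) for group in groups.values()]
--     return sorted(winners, key=lambda x: x.get("source_id", ""))
-- ===== Notes on version B (the rewrite author's own statement) =====
-- stated objective: alternative
-- what changed: Replaces A's single-pass running-best dict (which threads a temporary '_date_folder' key through stored copies and pops it afterwards) by a group-then-reduce decomposition: one pass groups files by source_id, then each group is reduced with max(key=date_folder) (first maximal wins, matching A's strict '>'), and the winners are returned sorted by source_id; …
-- outside the precondition, e.g. on pick_latest_per_source([{'_date_folder': 'z'}]): A returns [{}], B returns [{'_date_folder': 'z'}]; on pick_latest_per_source([{}, {'_date_folder': 'z'}]): A returns [{}], B returns [{}]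
import Mathlib
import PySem

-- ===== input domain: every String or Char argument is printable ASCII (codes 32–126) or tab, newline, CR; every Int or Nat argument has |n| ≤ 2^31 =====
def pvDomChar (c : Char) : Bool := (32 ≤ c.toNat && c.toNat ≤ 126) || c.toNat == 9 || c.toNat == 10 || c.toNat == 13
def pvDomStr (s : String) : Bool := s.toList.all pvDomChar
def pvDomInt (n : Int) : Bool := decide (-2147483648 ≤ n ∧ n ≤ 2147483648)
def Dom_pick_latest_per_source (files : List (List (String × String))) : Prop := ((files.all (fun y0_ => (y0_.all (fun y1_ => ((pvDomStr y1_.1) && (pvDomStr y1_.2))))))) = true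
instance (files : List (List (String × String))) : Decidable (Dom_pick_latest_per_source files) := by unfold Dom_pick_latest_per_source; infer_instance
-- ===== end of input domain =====

-- B replaces A's running-best dict (which threads a temporary "_date_folder" key through
-- stored copies and pops it afterwards) by a group-by-source_id pass followed by a per-group
-- max (alternative decomposition). Pre_ excludes input dicts that already carry A's reserved
-- bookkeeping key "_date_folder" (see the sentence above Pre_).
-- Inner dicts arrive as association lists; a Python dict built from such pairs keeps the LAST
-- value per key in first-occurrence position, hence every read of them goes through
-- PySem.Dict.ofList (exact also when the list carries duplicate keys).

-- ===== PORT A =====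
-- shared A-side helpers (also cited by D_ below): the source_id and date-folder fields
-- a file dict carries — f.get("source_id", "") and parts[-2]-of-key.split("/")
def pvSid (f : List (String × String)) : String := (PySem.Dict.ofList f).getD "source_id" ""

def pvDateFolder (f : List (String × String)) : String :=
  let parts := (PySem.Str.split? ((PySem.Dict.ofList f).getD "key" "") "/").getD []
  if 2 ≤ parts.length then PySem.List.pyGetD parts (-2) "" else ""

def pick_latest_per_source (files : List (List (String × String))) : List (List (String × String)) :=
  let latest : PySem.Dict String (PySem.Dict String String) :=
    files.foldl (fun latest f =>
      let fd := PySem.Dict.ofList f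
      let source_id := pvSid f                                   -- source_id = f.get("source_id", "")
      let date_folder := pvDateFolder f                          -- key = f.get("key", ""); parts = key.split("/");
                                                                 -- date_folder = parts[-2] if len(parts) >= 2 else ""
      match latest.get? source_id with                           -- prev = latest.get(source_id)
      | none => latest.insert source_id (fd.insert "_date_folder" date_folder)
      | some prev =>
          if prev.getD "_date_folder" "" < date_folder then      -- date_folder > prev.get("_date_folder", "")
            latest.insert source_id (fd.insert "_date_folder" date_folder)
          else latest)
      PySem.Dict.empty
  let result := latest.values.foldl (fun res item =>
      res ++ [(item.erase "_date_folder").items]) []             -- item.pop("_date_folder", None); result.append(item)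
  PySem.List.sorted result (fun x => (PySem.Dict.mk x).getD "source_id" "") false

-- ===== PORT B =====
def pick_latest_per_source_alt (files : List (List (String × String))) : List (List (String × String)) :=
  let groups : PySem.Dict String (List (List (String × String))) :=
    files.foldl (fun g f =>
      g.modify ((PySem.Dict.ofList f).getD "source_id" "") [] (· ++ [f])) PySem.Dict.empty
      -- groups.setdefault(f.get("source_id", ""), []).append(f)
  let winners := groups.values.foldl (fun res group =>
      match PySem.List.max? group pvDateFolder with              -- max(group, key=date_folder)
      | some m => res ++ [(PySem.Dict.ofList m).items]
      | none => res) []                                          -- unreachable: stored groups are nonempty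
  PySem.List.sorted winners (fun x => (PySem.Dict.mk x).getD "source_id" "") false

-- ===== PRECONDITION & SPEC =====
-- Pre_ excludes inputs where some file dict already contains A's reserved bookkeeping key
-- "_date_folder": there A silently strips that field from the selected files (an artefact of
-- its temp-key bookkeeping) while B keeps the file unchanged — a corner no caller would
-- specify, with either value defensible.
def Pre_pick_latest_per_source (files : List (List (String × String))) : Prop :=
  (files.all (fun f => f.all (fun p => !(p.1 == "_date_folder")))) = true
instance (files : List (List (String × String))) : Decidable (Pre_pick_latest_per_source files) := by
  unfold Pre_pick_latest_per_source; infer_instance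

def pvWitness_pick_latest_per_source : (List (List (String × String))) :=
  [[("key", "s/20240101/f.csv"), ("source_id", "s")],
   [("key", "s/20240102/g.csv"), ("source_id", "s")],
   [("key", "t/20230101/h.csv"), ("source_id", "t")]]

def Spec_pick_latest_per_source (files : List (List (String × String))) (out : List (List (String × String))) : Prop :=
  out = pick_latest_per_source_alt files
instance (files : List (List (String × String))) (out : List (List (String × String))) : Decidable (Spec_pick_latest_per_source files out) := by unfold Spec_pick_latest_per_source; infer_instance

-- ===== CLAIM (what is proved, stated in full; the proofs are below) =====
def Claim_equal_pick_latest_per_source : Prop := ∀ (files : List (List (String × String))), Dom_pick_latest_per_source files → Pre_pick_latest_per_source files → Spec_pick_latest_per_source files (pick_latest_per_source files)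

-- ===== LEMMAS AND PROOFS =====

def pvFilt (fs : List (List (String × String))) (s : String) : List (List (String × String)) :=
  fs.filter (fun f => pvSid f == s)

def pvHasDFb (f : List (String × String)) : Bool := f.any (fun p => p.1 == "_date_folder")

def pvStore (f : List (String × String)) : PySem.Dict String String :=
  (PySem.Dict.ofList f).insert "_date_folder" (pvDateFolder f)

def pvStepA (L : PySem.Dict String (PySem.Dict String String)) (f : List (String × String)) :
    PySem.Dict String (PySem.Dict String String) :=
  match L.get? (pvSid f) with
  | none => L.insert (pvSid f) (pvStore f)
  | some prev =>
      if prev.getD "_date_folder" "" < pvDateFolder f then L.insert (pvSid f) (pvStore f) else L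

def pvPickItemsA (fs : List (List (String × String))) (s : String) : List (String × String) :=
  match PySem.List.max? (pvFilt fs s) pvDateFolder with
  | some m => ((PySem.Dict.ofList m).erase "_date_folder").items
  | none => []

def pvPickItemsB (fs : List (List (String × String))) (s : String) : List (String × String) :=
  match PySem.List.max? (pvFilt fs s) pvDateFolder with
  | some m => (PySem.Dict.ofList m).items
  | none => []

lemma pvA_eq (files : List (List (String × String))) :
    pick_latest_per_source files =
      PySem.List.sorted
        ((files.foldl pvStepA PySem.Dict.empty).values.foldl
          (fun res item => res ++ [(item.erase "_date_folder").items]) [])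
        (fun x => (PySem.Dict.mk x).getD "source_id" "") false := rfl

lemma pv_max?_append_singleton {α κ : Type} [LT κ] [DecidableLT κ] (l : List α) (x : α) (key : α → κ) :
    PySem.List.max? (l ++ [x]) key =
      match PySem.List.max? l key with
      | none => some x
      | some m => if key m < key x then some x else some m := by
  simp [PySem.List.max?, List.foldl_append]
  rfl

lemma pv_erase_insert_self {κ ν : Type} [BEq κ] [LawfulBEq κ] (d : PySem.Dict κ ν) (k : κ) (v : ν) :
    (d.insert k v).erase k = d.erase k := by
  apply PySem.Dict.ext
  simp [PySem.Dict.erase, PySem.Dict.items_insert]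
  split
  · rw [List.filter_map]
    rw [List.filter_congr (q := fun p => !p.1 == k) ?_]
    · rw [List.map_congr_left (g := id) ?_, List.map_id]
      intro p hp; simp at hp; simp [hp.2]
    · intro p _; by_cases h : p.1 == k <;> simp [h]
  · simp

lemma pvAinv (fs : List (List (String × String))) :
    (fs.foldl pvStepA PySem.Dict.empty).keys = PySem.Set.ofList (fs.map pvSid) ∧
    ∀ s, (fs.foldl pvStepA PySem.Dict.empty).get? s =
        Option.map pvStore (PySem.List.max? (pvFilt fs s) pvDateFolder) := by
  induction fs using List.reverseRecOn with
  | nil =>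
    constructor
    · simp [PySem.Set.ofList]
    · intro s; simp [pvFilt, PySem.List.max?, PySem.Dict.get?_empty]
  | append_singleton l f ih =>
    obtain ⟨ihk, ihg⟩ := ih
    have hfold : (l ++ [f]).foldl pvStepA PySem.Dict.empty
        = pvStepA (l.foldl pvStepA PySem.Dict.empty) f := by
      simp [List.foldl_append]
    have hfilt : ∀ s, pvFilt (l ++ [f]) s
        = pvFilt l s ++ (if pvSid f == s then [f] else []) := by
      intro s; simp [pvFilt, List.filter_append, List.filter]
      split <;> simp_all
    cases hm : PySem.List.max? (pvFilt l (pvSid f)) pvDateFolder with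
    | none =>
      have hg : (l.foldl pvStepA PySem.Dict.empty).get? (pvSid f) = none := by
        rw [ihg, hm]; rfl
      have hstep : pvStepA (l.foldl pvStepA PySem.Dict.empty) f
          = (l.foldl pvStepA PySem.Dict.empty).insert (pvSid f) (pvStore f) := by
        simp [pvStepA, hg]
      have hnotmem : pvSid f ∉ PySem.Set.ofList (l.map pvSid) := by
        rw [PySem.Set.mem_ofList]
        intro hmem
        obtain ⟨f', hf', hsid⟩ := List.mem_map.mp hmem
        have : f' ∈ pvFilt l (pvSid f) := by
          simp [pvFilt, List.mem_filter, hf', hsid]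
        have := List.ne_nil_of_mem this
        exact this ((PySem.List.max?_eq_none_iff _ _).mp hm)
      have hcont : (l.foldl pvStepA PySem.Dict.empty).contains (pvSid f) = false := by
        rw [PySem.Dict.contains_eq_isSome_get?, hg]; rfl
      constructor
      · rw [hfold, hstep, PySem.Dict.keys_insert_of_not_contains _ _ hcont, ihk,
           List.map_append, List.map_singleton, PySem.Set.ofList_append_singleton,
           PySem.Set.add_of_not_mem hnotmem]
      · intro s
        rw [hfold, hstep, hfilt]
        by_cases hs : s = pvSid f
        · subst hs
          rw [PySem.Dict.get?_insert_self, if_pos (by simp), pv_max?_append_singleton, hm]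
          rfl
        · rw [PySem.Dict.get?_insert_of_ne _ _ hs, ihg,
             if_neg (by simp; exact fun h => hs (Eq.symm h))]
          simp
    | some m =>
      have hg : (l.foldl pvStepA PySem.Dict.empty).get? (pvSid f) = some (pvStore m) := by
        rw [ihg, hm]; rfl
      have hgetd : (pvStore m).getD "_date_folder" "" = pvDateFolder m := by
        simp [pvStore, PySem.Dict.getD_insert_self]
      have hstep : pvStepA (l.foldl pvStepA PySem.Dict.empty) f
          = if pvDateFolder m < pvDateFolder f
            then (l.foldl pvStepA PySem.Dict.empty).insert (pvSid f) (pvStore f)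
            else (l.foldl pvStepA PySem.Dict.empty) := by
        simp [pvStepA, hg, hgetd]
      have hmmem : m ∈ pvFilt l (pvSid f) := PySem.List.max?_mem hm
      have hmem : pvSid f ∈ PySem.Set.ofList (l.map pvSid) := by
        rw [PySem.Set.mem_ofList]
        have h1 := (List.mem_filter.mp hmmem)
        exact List.mem_map.mpr ⟨m, h1.1, by simpa using h1.2⟩
      have hcont : (l.foldl pvStepA PySem.Dict.empty).contains (pvSid f) = true := by
        rw [PySem.Dict.contains_eq_isSome_get?, hg]; rfl
      constructor
      · rw [hfold, hstep]
        have hR : PySem.Set.ofList ((l ++ [f]).map pvSid)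
            = PySem.Set.ofList (l.map pvSid) := by
          rw [List.map_append, List.map_singleton, PySem.Set.ofList_append_singleton,
             PySem.Set.add_of_mem hmem]
        rw [hR]
        split
        · rw [PySem.Dict.keys_insert_of_contains _ _ hcont, ihk]
        · exact ihk
      · intro s
        rw [hfold, hstep, hfilt]
        by_cases hs : s = pvSid f
        · subst hs
          simp only [beq_self_eq_true, if_true]
          rw [pv_max?_append_singleton, hm]
          change _ = Option.map pvStore (if pvDateFolder m < pvDateFolder f then some f else some m)
          by_cases hlt : pvDateFolder m < pvDateFolder f
          · rw [if_pos hlt, if_pos hlt, PySem.Dict.get?_insert_self]; rfl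
          · rw [if_neg hlt, if_neg hlt, hg]; rfl
        · have hbe : (pvSid f == s) = false := by
            simp; exact fun h => hs (Eq.symm h)
          rw [hbe]
          simp only [Bool.false_eq_true, if_false, List.append_nil]
          split
          · rw [PySem.Dict.get?_insert_of_ne _ _ hs, ihg]
          · rw [ihg]

lemma pvA_presort (fs : List (List (String × String))) :
    (fs.foldl pvStepA PySem.Dict.empty).values.foldl
        (fun res item => res ++ [(item.erase "_date_folder").items]) [] =
      (PySem.Set.ofList (fs.map pvSid)).map (pvPickItemsA fs) := by
  obtain ⟨hk, hg⟩ := pvAinv fs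
  have hnd : (fs.foldl pvStepA PySem.Dict.empty).keys.Nodup := by
    rw [hk]; exact PySem.Set.nodup_ofList _
  rw [PySem.List.foldl_append_singleton_eq_map, List.nil_append,
     PySem.Dict.values_eq_map_keys _ hnd PySem.Dict.empty, hk, List.map_map]
  apply List.map_congr_left
  intro s hsmem
  have hex : ∃ m, PySem.List.max? (pvFilt fs s) pvDateFolder = some m := by
    rw [PySem.Set.mem_ofList] at hsmem
    obtain ⟨f, hf, hsid⟩ := List.mem_map.mp hsmem
    cases hmax : PySem.List.max? (pvFilt fs s) pvDateFolder with
    | some m => exact ⟨m, rfl⟩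
    | none =>
      have hfil : f ∈ pvFilt fs s := by simp [pvFilt, List.mem_filter, hf, hsid]
      exact absurd ((PySem.List.max?_eq_none_iff _ _).mp hmax) (List.ne_nil_of_mem hfil)
  obtain ⟨m, hmax⟩ := hex
  have hgs := hg s
  rw [hmax, Option.map_some] at hgs
  simp only [Function.comp_apply]
  rw [PySem.Dict.getD_of_get?_eq_some _ _ hgs]
  simp [pvPickItemsA, hmax, pvStore, pv_erase_insert_self]

lemma pvB_groups (fs : List (List (String × String))) :
    (fs.foldl (fun g f => g.modify ((PySem.Dict.ofList f).getD "source_id" "") [] (· ++ [f]))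
        (PySem.Dict.empty : PySem.Dict String (List (List (String × String))))).keys
      = PySem.Set.ofList (fs.map pvSid) ∧
    ∀ s, (fs.foldl (fun g f => g.modify ((PySem.Dict.ofList f).getD "source_id" "") [] (· ++ [f]))
        (PySem.Dict.empty : PySem.Dict String (List (List (String × String))))).getD s []
      = pvFilt fs s := by
  constructor
  · have h := PySem.Dict.keys_foldl_modify_key fs
      (fun f => (PySem.Dict.ofList f).getD "source_id" "")
      ([] : List (List (String × String))) (fun _ f => (· ++ [f])) PySem.Dict.empty
    simpa [PySem.Set.update_nil_left, pvSid, PySem.Dict.keys] using h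
  · intro s
    have h := PySem.Dict.getD_foldl_modify_append (fs.map (fun f => (pvSid f, f)))
      (PySem.Dict.empty : PySem.Dict String (List (List (String × String)))) s
    rw [List.foldl_map] at h
    rw [List.filter_map, List.map_map] at h
    simp only [Function.comp_def] at h
    simpa [pvFilt, pvSid] using h

lemma pvB_presort (fs : List (List (String × String))) :
    (fs.foldl (fun g f => g.modify ((PySem.Dict.ofList f).getD "source_id" "") [] (· ++ [f]))
        (PySem.Dict.empty : PySem.Dict String (List (List (String × String))))).values.foldl
      (fun res group =>
        match PySem.List.max? group pvDateFolder with
        | some m => res ++ [(PySem.Dict.ofList m).items]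
        | none => res) []
      = (PySem.Set.ofList (fs.map pvSid)).map (pvPickItemsB fs) := by
  obtain ⟨hk, hg⟩ := pvB_groups fs
  have hnd : (fs.foldl (fun g f => g.modify ((PySem.Dict.ofList f).getD "source_id" "") [] (· ++ [f]))
      (PySem.Dict.empty : PySem.Dict String (List (List (String × String))))).keys.Nodup := by
    rw [hk]; exact PySem.Set.nodup_ofList _
  rw [PySem.Dict.values_eq_map_keys _ hnd [], hk, List.foldl_map,
     PySem.List.foldl_congr_mem _ _ (fun res s => res ++ [pvPickItemsB fs s]) [] ?_]
  · rw [PySem.List.foldl_append_singleton_eq_map, List.nil_append]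
  · intro acc s hsmem
    have hex : ∃ m, PySem.List.max? (pvFilt fs s) pvDateFolder = some m := by
      rw [PySem.Set.mem_ofList] at hsmem
      obtain ⟨f, hf, hsid⟩ := List.mem_map.mp hsmem
      cases hmax : PySem.List.max? (pvFilt fs s) pvDateFolder with
      | some m => exact ⟨m, rfl⟩
      | none =>
        have hfil : f ∈ pvFilt fs s := by simp [pvFilt, List.mem_filter, hf, hsid]
        exact absurd ((PySem.List.max?_eq_none_iff _ _).mp hmax) (List.ne_nil_of_mem hfil)
    obtain ⟨m, hmax⟩ := hex
    rw [hg s, hmax]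
    simp [pvPickItemsB, hmax]

lemma pvB_eq (files : List (List (String × String))) :
    pick_latest_per_source_alt files =
      PySem.List.sorted ((PySem.Set.ofList (files.map pvSid)).map (pvPickItemsB files))
        (fun x => (PySem.Dict.mk x).getD "source_id" "") false := by
  rw [pick_latest_per_source_alt.eq_def]
  simp only []
  rw [pvB_presort]










lemma pvKeys_ofList (m : List (String × String)) :
    (PySem.Dict.ofList m).keys = PySem.Set.ofList (m.map Prod.fst) := by
  have h := PySem.Dict.keys_foldl_insert_key m Prod.fst (fun _ a => a.2)
      (PySem.Dict.empty : PySem.Dict String String)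
  simpa [PySem.Dict.ofList, PySem.Dict.update, PySem.Set.update_nil_left, PySem.Dict.keys] using h

lemma pv_erase_of_no_df (m : List (String × String)) (h : pvHasDFb m = false) :
    ((PySem.Dict.ofList m).erase "_date_folder").items = (PySem.Dict.ofList m).items := by
  simp only [PySem.Dict.erase]
  apply List.filter_eq_self.mpr
  intro p hp
  have hk : p.1 ∈ (PySem.Dict.ofList m).keys := PySem.Dict.mem_keys_of_mem_items _ hp
  rw [pvKeys_ofList, PySem.Set.mem_ofList] at hk
  obtain ⟨q, hq, hqe⟩ := List.mem_map.mp hk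
  have h' : ∀ r ∈ m, r.1 ≠ "_date_folder" := by
    intro r hr he
    have : pvHasDFb m = true := by
      unfold pvHasDFb
      rw [List.any_eq_true]
      exact ⟨r, hr, by simp [he]⟩
    rw [h] at this
    exact absurd this Bool.false_ne_true
  simp only [Bool.not_eq_true', beq_eq_false_iff_ne, ne_eq]
  intro he
  exact h' q hq (hqe.trans he)

-- ===== VERDICT proofs =====
theorem pick_latest_per_source_spec : Claim_equal_pick_latest_per_source := by
  intro files _ hpre
  unfold Spec_pick_latest_per_source
  rw [pvA_eq, pvB_eq, pvA_presort]
  have hcong : (PySem.Set.ofList (files.map pvSid)).map (pvPickItemsA files)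
      = (PySem.Set.ofList (files.map pvSid)).map (pvPickItemsB files) := by
    apply List.map_congr_left
    intro s _
    unfold pvPickItemsA pvPickItemsB
    cases hmax : PySem.List.max? (pvFilt files s) pvDateFolder with
    | none => rfl
    | some m =>
      simp only []
      have hmf : m ∈ pvFilt files s := PySem.List.max?_mem hmax
      have hmfiles : m ∈ files := (List.mem_filter.mp hmf).1
      have hnk : pvHasDFb m = false := by
        unfold Pre_pick_latest_per_source at hpre
        rw [List.all_eq_true] at hpre
        have hm := hpre m hmfiles
        unfold pvHasDFb
        rw [List.any_eq_false]
        intro p hp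
        have := List.all_eq_true.mp hm p hp
        simpa using this
      exact pv_erase_of_no_df m hnk
  rw [hcong]
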